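-- pv_equiv track=rewrite | github.com/mlmarcosluan/mc102 | lab13.py | def_organiza
-- ===== SOURCE A (Python) =====
-- def def_organiza (dic_votos):
--
--     tuplas_candidatos_votos = list(dic_votos.items ())
--
--     for final in range (len (tuplas_candidatos_votos), 0, -1):
--
--         trocas = False
--
--         for atual in range (0, final -1):
--
--             atual_t = tuplas_candidatos_votos[atual][1]
--             proximo_t = tuplas_candidatos_votos[atual + 1][1]
--
--             if atual_t < proximo_t:
--                 tuplas_candidatos_votos[atual], tuplas_candidatos_votos[atual + 1] = tuplas_candidatos_votos[atual + 1], tuplas_candidatos_votos[atual]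
--
--                 trocas = True
--
--         if not trocas:
--             break
--
--
--     return tuplas_candidatos_votos
-- ===== SOURCE B (Python) =====
-- def def_organiza(dic_votos):
--     return sorted(dic_votos.items(), key=lambda t: t[1], reverse=True)
-- ===== Notes on version B (the rewrite author's own statement) =====
-- stated objective: faster
-- what changed: Replaces the hand-written adjacent-swap bubble sort (with early-exit flag) by a single call to Python's built-in stable sort with key=votes and reverse=True.
import Mathlib
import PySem

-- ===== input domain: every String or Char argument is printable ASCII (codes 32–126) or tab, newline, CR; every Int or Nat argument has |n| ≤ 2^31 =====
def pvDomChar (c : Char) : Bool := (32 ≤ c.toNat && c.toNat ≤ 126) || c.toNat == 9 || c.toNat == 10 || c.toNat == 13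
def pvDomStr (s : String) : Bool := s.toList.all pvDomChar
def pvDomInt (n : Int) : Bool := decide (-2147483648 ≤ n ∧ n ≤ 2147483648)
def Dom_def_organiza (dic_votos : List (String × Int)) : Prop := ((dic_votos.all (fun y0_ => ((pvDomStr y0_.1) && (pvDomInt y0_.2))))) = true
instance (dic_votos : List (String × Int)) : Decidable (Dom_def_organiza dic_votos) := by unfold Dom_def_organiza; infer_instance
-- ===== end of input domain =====

-- B replaces A's hand-written adjacent-swap bubble sort (early-exit flag) by the built-in stable sort, key = votes, reverse = True.


-- ===== PORT A =====
-- inner loop: 'for atual in range(0, final-1)' over the swap array, carrying the flag 'trocas';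
-- k = number of remaining comparisons, the head is the element currently at position 'atual'
def bubblePass (k : Nat) (l : List (String × Int)) : List (String × Int) × Bool :=
  match k, l with
  | 0, l => (l, false)
  | k + 1, x :: y :: t =>
      if x.2 < y.2 then
        let r := bubblePass k (x :: t)
        (y :: r.1, true)
      else
        let r := bubblePass k (y :: t)
        (x :: r.1, r.2)
  | _ + 1, l => (l, false)

-- outer loop: 'for final in range(len(l), 0, -1)' with the 'if not trocas: break' early exit
def bubbleOuter (n : Nat) (l : List (String × Int)) : List (String × Int) :=
  match n with
  | 0 => l
  | n + 1 =>
      let r := bubblePass n l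
      if r.2 then bubbleOuter n r.1 else r.1

def def_organiza (dic_votos : List (String × Int)) : List (String × Int) :=
  bubbleOuter dic_votos.length dic_votos

-- ===== PORT B =====
def def_organiza_alt (dic_votos : List (String × Int)) : List (String × Int) :=
  PySem.List.sorted dic_votos (fun t => t.2) true

-- ===== PRECONDITION & SPEC =====
def Spec_def_organiza (dic_votos : List (String × Int)) (out : List (String × Int)) : Prop := out = def_organiza_alt dic_votos
instance (dic_votos : List (String × Int)) (out : List (String × Int)) : Decidable (Spec_def_organiza dic_votos out) := by unfold Spec_def_organiza; infer_instance

-- ===== CLAIM (what is proved, stated in full; the proofs are below) =====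
def Claim_equal_def_organiza : Prop := ∀ (dic_votos : List (String × Int)), Dom_def_organiza dic_votos → Spec_def_organiza dic_votos (def_organiza dic_votos)

-- ===== LEMMAS AND PROOFS =====

-- the per-vote-value subsequence: both sorts preserve it
def filtV (v : Int) (l : List (String × Int)) : List (String × Int) :=
  l.filter (fun p => decide (p.2 = v))

-- two descending-pairwise lists with the same per-value subsequences are equal
theorem uniq_sorted_filt : ∀ (l₁ l₂ : List (String × Int)),
    l₁.Pairwise (fun a b => b.2 ≤ a.2) → l₂.Pairwise (fun a b => b.2 ≤ a.2) →
    (∀ v : Int, filtV v l₁ = filtV v l₂) → l₁ = l₂ := by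
  intro l₁
  induction l₁ with
  | nil =>
    intro l₂ _ _ hf
    match l₂ with
    | [] => rfl
    | b :: t =>
      have := hf b.2
      simp [filtV] at this
  | cons a t₁ ih =>
    intro l₂ hp₁ hp₂ hf
    match l₂ with
    | [] =>
      have := hf a.2
      simp [filtV] at this
    | b :: t₂ =>
      have hab : a.2 = b.2 := by
        by_contra hne
        rcases lt_or_gt_of_ne hne with hlt | hgt
        · -- a.2 < b.2 : filtV b.2 l₁ is empty but contains b
          have h1 := hf b.2
          have : filtV b.2 (a :: t₁) = [] := by
            simp only [filtV, List.filter_eq_nil_iff]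
            intro z hz
            rcases List.mem_cons.mp hz with rfl | hz
            · simp; omega
            · have := (List.pairwise_cons.mp hp₁).1 z hz
              simp; omega
          rw [this] at h1
          simp [filtV] at h1
        · have h1 := hf a.2
          have : filtV a.2 (b :: t₂) = [] := by
            simp only [filtV, List.filter_eq_nil_iff]
            intro z hz
            rcases List.mem_cons.mp hz with rfl | hz
            · simp; omega
            · have := (List.pairwise_cons.mp hp₂).1 z hz
              simp; omega
          rw [this] at h1
          simp [filtV] at h1
      have hfa := hf a.2
      simp only [filtV, List.filter_cons, decide_eq_true_eq, if_pos hab.symm] at hfa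
      have heq : a = b := (List.cons.injEq _ _ _ _ ▸ hfa).1
      subst heq
      have htail : ∀ v : Int, filtV v t₁ = filtV v t₂ := by
        intro v
        have := hf v
        simp only [filtV, List.filter_cons] at this
        by_cases hv : a.2 = v
        · simpa [hv] using this
        · simpa [hv] using this
      rw [ih t₂ (List.pairwise_cons.mp hp₁).2 (List.pairwise_cons.mp hp₂).2 htail]

-- a bubble pass preserves every per-value subsequence
theorem filtV_bubblePass (v : Int) : ∀ (k : Nat) (l : List (String × Int)),
    filtV v (bubblePass k l).1 = filtV v l := by
  intro k
  induction k with
  | zero => intro l; simp [bubblePass]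
  | succ k ih =>
    intro l
    match l with
    | [] => simp [bubblePass]
    | [x] => simp [bubblePass]
    | x :: y :: t =>
      by_cases h : x.2 < y.2
      · have hx : ¬ (x.2 = v ∧ y.2 = v) := by rintro ⟨h1, h2⟩; omega
        have := ih (x :: t)
        simp only [bubblePass, if_pos h, filtV, List.filter_cons] at *
        by_cases hy : y.2 = v <;> by_cases hxv : x.2 = v <;>
          simp_all
      · have := ih (y :: t)
        simp only [bubblePass, if_neg h, filtV, List.filter_cons] at *
        by_cases hxv : x.2 = v <;> simp_all

theorem filtV_bubbleOuter (v : Int) : ∀ (n : Nat) (l : List (String × Int)),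
    filtV v (bubbleOuter n l) = filtV v l := by
  intro n
  induction n with
  | zero => intro l; simp [bubbleOuter]
  | succ n ih =>
    intro l
    simp only [bubbleOuter]
    split
    · rw [ih, filtV_bubblePass]
    · rw [filtV_bubblePass]

-- insertion into a descending-sorted list appends to the per-value subsequence
theorem filtV_insertBy (v : Int) : ∀ (s : List (String × Int)) (x : String × Int),
    s.Pairwise (fun a b => b.2 ≤ a.2) →
    filtV v (PySem.List.insertBy (fun a b => decide (b.2 < a.2)) x s)
      = filtV v s ++ filtV v [x] := by
  intro s
  induction s with
  | nil => intro x _; simp [PySem.List.insertBy, filtV]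
  | cons y s ih =>
    intro x hp
    by_cases h : y.2 < x.2
    · have hnone : filtV v (y :: s) = [] ∨ ¬ x.2 = v := by
        by_cases hxv : x.2 = v
        · left
          simp only [filtV, List.filter_eq_nil_iff]
          intro z hz
          rcases List.mem_cons.mp hz with rfl | hz
          · simp; omega
          · have := (List.pairwise_cons.mp hp).1 z hz
            simp; omega
        · right; exact hxv
      simp only [PySem.List.insertBy, decide_eq_true_eq, if_pos h]
      rcases hnone with h0 | h0
      · simp only [filtV, List.filter_cons] at h0 ⊢
        by_cases hxv : x.2 = v <;> simp_all
      · simp only [filtV, List.filter_cons]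
        simp [h0]
    · have := ih x (List.pairwise_cons.mp hp).2
      simp only [PySem.List.insertBy, decide_eq_true_eq, if_neg h]
      simp only [filtV, List.filter_cons] at this ⊢
      by_cases hyv : y.2 = v <;> simp_all

theorem filtV_sorted (v : Int) : ∀ (l : List (String × Int)),
    filtV v (PySem.List.sorted l (fun t => t.2) true) = filtV v l := by
  intro l
  induction l using List.reverseRecOn with
  | nil => simp [PySem.List.sorted]
  | append_singleton l x ih =>
    have hs : PySem.List.sorted (l ++ [x]) (fun t => t.2) true
        = PySem.List.insertBy (fun a b => decide (b.2 < a.2)) x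
            (PySem.List.sorted l (fun t => t.2) true) := by
      rw [PySem.List.sorted_rev_eq_foldl_insertBy, PySem.List.sorted_rev_eq_foldl_insertBy,
        List.foldl_append]
      simp
    rw [hs, filtV_insertBy v _ x (PySem.List.sorted_pairwise_rev l (fun t => t.2)), ih]
    simp [filtV]

-- bubblePass: length, no-swap cases
theorem bubblePass_length : ∀ (k : Nat) (l : List (String × Int)),
    ((bubblePass k l).1).length = l.length := by
  intro k
  induction k with
  | zero => intro l; simp [bubblePass]
  | succ k ih =>
    intro l
    match l with
    | [] => simp [bubblePass]
    | [x] => simp [bubblePass]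
    | x :: y :: t =>
      by_cases h : x.2 < y.2 <;>
        simp [bubblePass, h, ih (x :: t), ih (y :: t)]

theorem bubblePass_false_eq : ∀ (k : Nat) (l : List (String × Int)),
    (bubblePass k l).2 = false → (bubblePass k l).1 = l := by
  intro k
  induction k with
  | zero => intro l _; simp [bubblePass]
  | succ k ih =>
    intro l
    match l with
    | [] => simp [bubblePass]
    | [x] => simp [bubblePass]
    | x :: y :: t =>
      by_cases h : x.2 < y.2
      · simp [bubblePass, h]
      · intro hf
        simp only [bubblePass, if_neg h] at hf ⊢
        simp [ih (y :: t) hf]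

theorem bubblePass_false_pairwise : ∀ (k : Nat) (l : List (String × Int)),
    (bubblePass k l).2 = false →
    (l.take (k + 1)).Pairwise (fun a b => b.2 ≤ a.2) := by
  intro k
  induction k with
  | zero =>
    intro l _
    match l with
    | [] => simp
    | x :: t => simp
  | succ k ih =>
    intro l
    match l with
    | [] => simp
    | [x] => simp
    | x :: y :: t =>
      by_cases h : x.2 < y.2
      · simp [bubblePass, h]
      · intro hf
        simp only [bubblePass, if_neg h] at hf
        have hp := ih (y :: t) hf
        rw [List.take_succ_cons]
        refine List.pairwise_cons.mpr ⟨?_, hp⟩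
        intro z hz
        rw [List.take_succ_cons] at hz
        rcases List.mem_cons.mp hz with rfl | hz
        · omega
        · have := (List.pairwise_cons.mp hp).1 z hz
          omega

-- structure of one pass: a prefix of length k, then the carried minimum, then the untouched tail
theorem bubblePass_struct : ∀ (k : Nat) (l : List (String × Int)), k + 1 ≤ l.length →
    ∃ pre m, (bubblePass k l).1 = pre ++ m :: l.drop (k + 1) ∧ pre.length = k ∧
      (∀ x ∈ pre, x ∈ l.take (k + 1)) ∧ m ∈ l.take (k + 1) ∧
      (∀ x ∈ l.take (k + 1), m.2 ≤ x.2) := by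
  intro k
  induction k with
  | zero =>
    intro l hl
    match l with
    | x :: t =>
      exact ⟨[], x, by simp [bubblePass]⟩
  | succ k ih =>
    intro l hl
    match l with
    | x :: y :: t =>
      by_cases h : x.2 < y.2
      · obtain ⟨pre, m, he, hlen, hpre, hm, hmin⟩ := ih (x :: t) (by simp at hl ⊢; omega)
        refine ⟨y :: pre, m, ?_, by simp [hlen], ?_, ?_, ?_⟩
        · simp only [bubblePass, if_pos h]
          simp [he]
        · intro z hz
          rcases List.mem_cons.mp hz with rfl | hz
          · simp
          · have := hpre z hz
            simp only [List.take_succ_cons, List.mem_cons] at this ⊢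
            tauto
        · have := hm
          simp only [List.take_succ_cons, List.mem_cons] at this ⊢
          tauto
        · intro z hz
          simp only [List.take_succ_cons, List.mem_cons] at hz
          rcases hz with h1 | h1 | h1
          · rw [h1]; exact hmin x (by simp)
          · have hx := hmin x (by simp)
            rw [h1]; omega
          · exact hmin z (by simp [h1])
      · obtain ⟨pre, m, he, hlen, hpre, hm, hmin⟩ := ih (y :: t) (by simp at hl ⊢; omega)
        refine ⟨x :: pre, m, ?_, by simp [hlen], ?_, ?_, ?_⟩
        · simp only [bubblePass, if_neg h]
          simp [he]
        · intro z hz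
          rcases List.mem_cons.mp hz with rfl | hz
          · simp
          · have := hpre z hz
            simp only [List.take_succ_cons, List.mem_cons] at this ⊢
            tauto
        · have := hm
          simp only [List.take_succ_cons, List.mem_cons] at this ⊢
          tauto
        · intro z hz
          simp only [List.take_succ_cons, List.mem_cons] at hz
          rcases hz with h1 | h1 | h1
          · have hy := hmin y (by simp)
            rw [h1]; omega
          · rw [h1]; exact hmin y (by simp)
          · exact hmin z (by simp [h1])

theorem bubbleOuter_pairwise : ∀ (n : Nat) (l : List (String × Int)), n ≤ l.length →
    (l.drop n).Pairwise (fun a b => b.2 ≤ a.2) →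
    (∀ x ∈ l.take n, ∀ y ∈ l.drop n, y.2 ≤ x.2) →
    (bubbleOuter n l).Pairwise (fun a b => b.2 ≤ a.2) := by
  intro n
  induction n with
  | zero => intro l _ hd _; simpa using hd
  | succ n ih =>
    intro l hn hd hc
    simp only [bubbleOuter]
    split
    case isTrue ht =>
      obtain ⟨pre, m, he, hlen, hpre, hm, hmin⟩ := bubblePass_struct n l hn
      apply ih
      · rw [bubblePass_length]; omega
      · have hdrop : (bubblePass n l).1.drop n = m :: l.drop (n + 1) := by
          rw [he, List.drop_append_of_le_length (by omega)]
          simp [hlen]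
        rw [hdrop]
        refine List.pairwise_cons.mpr ⟨?_, hd⟩
        intro y hy
        exact hc m hm y hy
      · have htake : (bubblePass n l).1.take n = pre := by
          rw [he, List.take_append_of_le_length (by omega)]
          simp [hlen]
        have hdrop : (bubblePass n l).1.drop n = m :: l.drop (n + 1) := by
          rw [he, List.drop_append_of_le_length (by omega)]
          simp [hlen]
        rw [htake, hdrop]
        intro x hx y hy
        rcases List.mem_cons.mp hy with rfl | hy
        · exact hmin x (hpre x hx)
        · exact hc x (hpre x hx) y hy
    case isFalse hf =>
      rw [bubblePass_false_eq n l (by simpa using hf)]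
      have hp := bubblePass_false_pairwise n l (by simpa using hf)
      rw [← List.take_append_drop (n + 1) l]
      apply List.pairwise_append.mpr
      exact ⟨hp, hd, fun x hx y hy => hc x hx y hy⟩

-- ===== VERDICT (by name: the statement is the Claim_ definition above) =====
theorem def_organiza_spec : Claim_equal_def_organiza := by
  intro l _
  show def_organiza l = def_organiza_alt l
  apply uniq_sorted_filt
  · exact bubbleOuter_pairwise l.length l le_rfl
      (by simp) (by simp)
  · exact PySem.List.sorted_pairwise_rev l (fun t => t.2)
  · intro v
    rw [show def_organiza l = bubbleOuter l.length l from rfl, filtV_bubbleOuter]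
    exact (filtV_sorted v l).symm
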